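-- pv_equiv track=rewrite | github.com/retroaegx/ShogiAnalyzer | server/app/core/sfen_ops.py | _serialize_board
-- ===== SOURCE A (Python) =====
-- def _serialize_board(board: list[list[str | None]]) -> str:
--     ranks: list[str] = []
--     for row in board:
--         empties = 0
--         parts: list[str] = []
--         for cell in row:
--             if not cell:
--                 empties += 1
--                 continue
--             if empties:
--                 parts.append(str(empties))
--                 empties = 0
--             parts.append(cell)
--         if empties:
--             parts.append(str(empties))
--         ranks.append("".join(parts) or "9")
--     return "/".join(ranks)
-- ===== SOURCE B (Python) =====
-- def _serialize_board(board):
--     return "/".join(_rank(row) or "9" for row in board)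
--
--
-- def _rank(row):
--     """Run-length serialization by splitting off the maximal leading run."""
--     if not row:
--         return ""
--     head_empty = not row[0]
--     i = 1
--     while i < len(row) and (not row[i]) == head_empty:
--         i += 1
--     tail = _rank(row[i:])
--     if head_empty:
--         return str(i) + tail
--     return "".join(row[:i]) + tail
-- ===== Notes on version B (the rewrite author's own statement) =====
-- stated objective: simpler
-- what changed: Replaces A's empties-counter-with-flush accumulator loop by a recursive decomposition that splits each row into its maximal leading run (of empty or non-empty cells) and emits that run's encoding directly.
import Mathlib
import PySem

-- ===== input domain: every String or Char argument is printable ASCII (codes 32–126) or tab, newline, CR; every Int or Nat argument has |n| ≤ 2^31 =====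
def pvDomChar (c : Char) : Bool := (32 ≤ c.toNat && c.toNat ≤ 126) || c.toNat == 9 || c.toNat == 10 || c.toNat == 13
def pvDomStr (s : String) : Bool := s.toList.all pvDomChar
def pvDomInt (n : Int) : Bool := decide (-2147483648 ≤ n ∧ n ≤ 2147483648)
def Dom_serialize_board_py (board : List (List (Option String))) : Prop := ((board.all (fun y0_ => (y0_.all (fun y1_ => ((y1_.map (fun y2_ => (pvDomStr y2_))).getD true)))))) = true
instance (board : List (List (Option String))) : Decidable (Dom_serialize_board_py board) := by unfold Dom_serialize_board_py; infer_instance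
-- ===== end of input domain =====

-- B replaces A's empties-counter-with-flush loop by a recursive split into maximal leading runs (objective: simpler).

-- ===== PORT A =====
-- Python `not cell`: cell is None or "".
def pvCellEmpty (c : Option String) : Bool :=
  match c with
  | none => true
  | some s => s.isEmpty

def pvCellStr (c : Option String) : String :=
  match c with
  | none => ""
  | some s => s

-- one iteration of A's inner `for cell in row` loop over state (empties, parts)
def pvStepA (st : Int × List String) (cell : Option String) : Int × List String :=
  if pvCellEmpty cell then (st.1 + 1, st.2)
  else
    let parts := if st.1 = 0 then st.2 else st.2 ++ [PySem.Int.toStr st.1]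
    (0, parts ++ [pvCellStr cell])

def pvRowA (row : List (Option String)) : String :=
  let st := row.foldl pvStepA (0, [])
  let parts := if st.1 = 0 then st.2 else st.2 ++ [PySem.Int.toStr st.1]
  let s := PySem.Str.join "" parts
  if s = "" then "9" else s

def serialize_board_py (board : List (List (Option String))) : String :=
  PySem.Str.join "/" (board.map pvRowA)

-- ===== PORT B =====
-- B's `_rank`: split off the maximal leading run matching the head's emptiness, recurse on the rest.
def pvRank (row : List (Option String)) : String :=
  match row with
  | [] => ""
  | c :: rest =>
    let he := pvCellEmpty c
    let run := rest.takeWhile (fun x => pvCellEmpty x == he)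
    let rest' := rest.dropWhile (fun x => pvCellEmpty x == he)
    let tail := pvRank rest'
    if he then PySem.Int.toStr ((1 + run.length : Nat) : Int) ++ tail
    else PySem.Str.join "" ((c :: run).map pvCellStr) ++ tail
termination_by row.length
decreasing_by
  simp only [List.length_cons]
  exact Nat.lt_succ_of_le (List.length_dropWhile_le _ _)

def serialize_board_py_alt (board : List (List (Option String))) : String :=
  PySem.Str.join "/" (board.map (fun row => let s := pvRank row; if s = "" then "9" else s))

-- ===== PRECONDITION & SPEC =====
def Spec_serialize_board_py (board : List (List (Option String))) (out : String) : Prop := out = serialize_board_py_alt board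
instance (board : List (List (Option String))) (out : String) : Decidable (Spec_serialize_board_py board out) := by unfold Spec_serialize_board_py; infer_instance

-- ===== CLAIM (what is proved, stated in full; the proofs are below) =====
def Claim_equal_serialize_board_py : Prop := ∀ (board : List (List (Option String))), Dom_serialize_board_py board → Spec_serialize_board_py board (serialize_board_py board)

-- ===== LEMMAS AND PROOFS =====

-- pending-empties reformulation of B's rank, structurally recursive
def pvRankP (k : Nat) : List (Option String) → String
  | [] => if k = 0 then "" else PySem.Int.toStr (k : Int)
  | c :: rest =>
    if pvCellEmpty c then pvRankP (k + 1) rest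
    else (if k = 0 then "" else PySem.Int.toStr (k : Int)) ++ pvCellStr c ++ pvRankP 0 rest

theorem pvJoin_nil : PySem.Str.join "" [] = "" := by
  simp [PySem.Str.join, PySem.Chars.join, List.intercalate]

theorem pvJoin_cons (a : String) (l : List String) :
    PySem.Str.join "" (a :: l) = a ++ PySem.Str.join "" l := by
  apply String.toList_inj.mp
  cases l <;> simp [PySem.Chars.join, List.intercalate]

theorem pvJoin_append_singleton (l : List String) (x : String) :
    PySem.Str.join "" (l ++ [x]) = PySem.Str.join "" l ++ x := by
  induction l with
  | nil => simp [pvJoin_nil, pvJoin_cons]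
  | cons a t ih => simp [pvJoin_cons, ih, String.append_assoc]

-- flush of A's final state (proof helper)
def pvFlush (st : Int × List String) : List String :=
  if st.1 = 0 then st.2 else st.2 ++ [PySem.Int.toStr st.1]

-- A's loop with pending empties k and accumulated parts computes join parts ++ pvRankP k row
theorem pvFoldA (row : List (Option String)) (k : Nat) (parts : List String) :
    PySem.Str.join "" (pvFlush (row.foldl pvStepA ((k : Int), parts)))
    = PySem.Str.join "" parts ++ pvRankP k row := by
  induction row generalizing k parts with
  | nil =>
    simp only [List.foldl_nil, pvRankP, pvFlush]
    by_cases h : k = 0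
    · simp [h]
    · have : (k : Int) ≠ 0 := by exact_mod_cast h
      simp [h, pvJoin_append_singleton]
  | cons c rest ih =>
    by_cases hc : pvCellEmpty c = true
    · have hcast : ((k : Int) + 1) = ((k + 1 : Nat) : Int) := by push_cast; ring
      simp only [List.foldl_cons, pvStepA, hc, if_true, hcast, ih, pvRankP]
    · simp only [Bool.not_eq_true] at hc
      have ih0 := fun p => ih 0 p
      simp only [Nat.cast_zero] at ih0
      by_cases h : k = 0
      · simp only [List.foldl_cons, pvStepA, hc, h, Nat.cast_zero, if_true,
          Bool.false_eq_true, if_false, ih0, pvRankP, pvJoin_append_singleton]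
        simp [String.append_assoc]
      · have hki : (k : Int) ≠ 0 := by exact_mod_cast h
        simp only [List.foldl_cons, pvStepA, hc, Bool.false_eq_true, if_false, if_neg hki, ih0,
          pvRankP, if_neg h, pvJoin_append_singleton]
        simp [String.append_assoc]

-- pending empties absorb a leading empty run
theorem pvRankP_empty_run (rest : List (Option String)) (k : Nat) (hk : k ≠ 0) :
    pvRankP k rest
      = PySem.Int.toStr ((k + (rest.takeWhile (fun x => pvCellEmpty x == true)).length : Nat) : Int)
        ++ pvRankP 0 (rest.dropWhile (fun x => pvCellEmpty x == true)) := by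
  induction rest generalizing k with
  | nil => simp [pvRankP, hk]
  | cons c r ih =>
    by_cases hc : pvCellEmpty c = true
    · simp only [pvRankP, hc, if_true, List.takeWhile_cons, List.dropWhile_cons, beq_iff_eq]
      rw [ih (k + 1) (Nat.succ_ne_zero k)]
      simp
      ring_nf
    · simp [pvRankP, hc, hk, String.append_assoc]

-- a leading non-empty run splits off cell by cell
theorem pvRankP_nonempty_run (rest : List (Option String)) :
    pvRankP 0 rest
      = PySem.Str.join "" ((rest.takeWhile (fun x => pvCellEmpty x == false)).map pvCellStr)
        ++ pvRankP 0 (rest.dropWhile (fun x => pvCellEmpty x == false)) := by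
  induction rest with
  | nil => simp [pvJoin_nil]
  | cons c r ih =>
    by_cases hc : pvCellEmpty c = true
    · simp [pvRankP, hc, pvJoin_nil]
    · simp only [Bool.not_eq_true] at hc
      simp only [pvRankP, hc, Bool.false_eq_true, if_false, if_true, List.takeWhile_cons,
        List.dropWhile_cons, beq_self_eq_true, List.map_cons, pvJoin_cons, ih]
      simp [String.append_assoc]

theorem pvRank_cons_empty (c : Option String) (rest : List (Option String))
    (hc : pvCellEmpty c = true) :
    pvRank (c :: rest)
      = PySem.Int.toStr ((1 + (rest.takeWhile (fun x => pvCellEmpty x == true)).length : Nat) : Int)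
        ++ pvRank (rest.dropWhile (fun x => pvCellEmpty x == true)) := by
  rw [pvRank]
  simp [hc]

theorem pvRank_cons_nonempty (c : Option String) (rest : List (Option String))
    (hc : pvCellEmpty c = false) :
    pvRank (c :: rest)
      = PySem.Str.join "" ((c :: rest.takeWhile (fun x => pvCellEmpty x == false)).map pvCellStr)
        ++ pvRank (rest.dropWhile (fun x => pvCellEmpty x == false)) := by
  rw [pvRank]
  simp [hc]

theorem pvRankP_eq_pvRank_aux (n : Nat) :
    ∀ (row : List (Option String)), row.length ≤ n → pvRankP 0 row = pvRank row := by
  induction n with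
  | zero =>
    intro row h
    have : row = [] := List.eq_nil_of_length_eq_zero (Nat.le_zero.mp h)
    subst this
    simp [pvRankP, pvRank]
  | succ n ih =>
    intro row h
    match row with
    | [] => simp [pvRankP, pvRank]
    | c :: rest =>
      have hlen : rest.length ≤ n := by
        simpa using Nat.le_of_succ_le_succ h
      by_cases hc : pvCellEmpty c = true
      · rw [pvRank_cons_empty c rest hc, pvRankP, if_pos hc,
          pvRankP_empty_run rest 1 one_ne_zero,
          ih _ (le_trans (List.length_dropWhile_le _ _) hlen)]
      · simp only [Bool.not_eq_true] at hc
        rw [pvRank_cons_nonempty c rest hc, pvRankP, if_neg (by simp [hc]), if_pos rfl,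
          pvRankP_nonempty_run rest,
          ih _ (le_trans (List.length_dropWhile_le _ _) hlen)]
        simp [pvJoin_cons, String.append_assoc]

theorem pvRankP_eq_pvRank (row : List (Option String)) : pvRankP 0 row = pvRank row :=
  pvRankP_eq_pvRank_aux row.length row le_rfl

theorem pvRowA_eq (row : List (Option String)) :
    pvRowA row = (let s := pvRank row; if s = "" then "9" else s) := by
  have h := pvFoldA row 0 []
  simp only [Nat.cast_zero] at h
  simp only [pvRowA, pvFlush] at h ⊢
  rw [h, pvJoin_nil, pvRankP_eq_pvRank]
  simp

-- ===== VERDICT (by name: the statement is the Claim_ definition above) =====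
theorem serialize_board_py_spec : Claim_equal_serialize_board_py := by
  intro board _
  unfold Spec_serialize_board_py serialize_board_py serialize_board_py_alt
  congr 1
  exact List.map_congr_left (fun row _ => pvRowA_eq row)
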